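-- pv_equiv track=rewrite | github.com/phenehan0/Project-Euler | python/pythagorean_triplets.py | factor_pairs
-- ===== SOURCE A (Python) =====
-- def factor_pairs(X, c):
--     idx1 = 1
--     idx2 = X-1
--     result = []
--     while idx1 <= idx2:
--         if idx1 != idx2 and idx1 < c and idx2 < c:
--             result.append((idx1, idx2))
--         idx1 += 1
--         idx2 -= 1
--     return result
-- ===== SOURCE B (Python) =====
-- def factor_pairs(X, c):
--     lo = max(1, X - c + 1)
--     hi = min((X - 1) // 2, c - 1)
--     return [(i, X - i) for i in range(lo, hi + 1)]
-- ===== Notes on version B (the rewrite author's own statement) =====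
-- stated objective: faster
-- what changed: B computes the valid i-range bounds in closed form (lo = max(1, X-c+1), hi = min((X-1)//2, c-1)) and builds the pairs directly over that range, instead of A's scan over all i from 1 to X//2 with a per-step filter.
import Mathlib
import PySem

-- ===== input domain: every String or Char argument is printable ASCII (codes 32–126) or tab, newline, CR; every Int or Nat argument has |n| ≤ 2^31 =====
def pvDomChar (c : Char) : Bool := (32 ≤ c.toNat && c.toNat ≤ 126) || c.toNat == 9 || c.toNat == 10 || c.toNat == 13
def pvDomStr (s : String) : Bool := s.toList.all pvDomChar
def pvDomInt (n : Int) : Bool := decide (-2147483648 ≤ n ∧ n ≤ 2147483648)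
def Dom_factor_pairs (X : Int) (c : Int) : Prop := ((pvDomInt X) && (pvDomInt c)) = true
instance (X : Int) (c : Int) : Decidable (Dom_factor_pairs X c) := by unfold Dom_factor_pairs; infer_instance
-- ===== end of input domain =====

-- B replaces A's scan over all i from 1 to X//2 (filtering each step) by a closed-form
-- range of the valid i, so B does work proportional to the output size.

-- ===== PORT A =====
-- the while loop of A, with its two counters and the accumulated result list
def factorLoopA (c idx1 idx2 : Int) (result : List (Int × Int)) : List (Int × Int) :=
  if _h : idx1 ≤ idx2 then
    factorLoopA c (idx1 + 1) (idx2 - 1)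
      (if idx1 ≠ idx2 ∧ idx1 < c ∧ idx2 < c then result ++ [(idx1, idx2)] else result)
  else result
termination_by (idx2 - idx1 + 1).toNat
decreasing_by omega

def factor_pairs (X : Int) (c : Int) : List (Int × Int) :=
  factorLoopA c 1 (X - 1) []

-- ===== PORT B =====
def factor_pairs_alt (X : Int) (c : Int) : List (Int × Int) :=
  let lo := max 1 (X - c + 1)
  let hi := min (PySem.Int.floordiv (X - 1) 2) (c - 1)
  (PySem.List.pyRange lo (hi + 1) 1).map (fun i => (i, X - i))

-- ===== PRECONDITION & SPEC =====
def Spec_factor_pairs (X : Int) (c : Int) (out : List (Int × Int)) : Prop := out = factor_pairs_alt X c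
instance (X : Int) (c : Int) (out : List (Int × Int)) : Decidable (Spec_factor_pairs X c out) := by unfold Spec_factor_pairs; infer_instance

-- ===== CLAIM (what is proved, stated in full; the proofs are below) =====
def Claim_equal_factor_pairs : Prop := ∀ (X : Int) (c : Int), Dom_factor_pairs X c → Spec_factor_pairs X c (factor_pairs X c)

-- ===== LEMMAS AND PROOFS =====

-- key loop invariant: the loop result is acc ++ the pairs (i, S - i) for i in the closed-form
-- range, where S = idx1 + idx2 is the constant sum of the two counters
theorem factorLoopA_eq (c : Int) : ∀ (n : Nat) (idx1 idx2 : Int) (acc : List (Int × Int)),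
    (idx2 - idx1 + 1).toNat = n →
    factorLoopA c idx1 idx2 acc =
      acc ++ (PySem.List.pyRange (max idx1 (idx1 + idx2 - c + 1))
        (min (PySem.Int.floordiv (idx1 + idx2 - 1) 2) (c - 1) + 1) 1).map
        (fun i => (i, idx1 + idx2 - i)) := by
  intro n
  induction n using Nat.strong_induction_on with
  | _ n ih =>
    intro idx1 idx2 acc hn
    have hfd : PySem.Int.floordiv (idx1 + idx2 - 1) 2 = (idx1 + idx2 - 1) / 2 := by
      simp [PySem.Int.floordiv, Int.fdiv_eq_ediv_of_nonneg _ (by norm_num : (0:Int) ≤ 2)]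
    unfold factorLoopA
    by_cases h1 : idx1 ≤ idx2
    · -- loop body runs
      rw [dif_pos h1,
        ih (idx2 - 1 - (idx1 + 1) + 1).toNat (by omega) (idx1 + 1) (idx2 - 1) _ rfl]
      have hsum : idx1 + 1 + (idx2 - 1) = idx1 + idx2 := by ring
      rw [hsum]
      by_cases hcond : idx1 ≠ idx2 ∧ idx1 < c ∧ idx2 < c
      · -- element appended: the closed-form range starts exactly at idx1
        rw [if_pos hcond]
        obtain ⟨hne, hc1, hc2⟩ := hcond
        have hmax1 : max idx1 (idx1 + idx2 - c + 1) = idx1 := by omega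
        have hmax2 : max (idx1 + 1) (idx1 + idx2 - c + 1) = idx1 + 1 := by omega
        have hlt : idx1 < min (PySem.Int.floordiv (idx1 + idx2 - 1) 2) (c - 1) + 1 := by
          rw [hfd]; omega
        rw [hmax1, hmax2, PySem.List.pyRange_one_cons hlt]
        simp
      · -- nothing appended: the two closed-form ranges coincide
        rw [if_neg hcond]
        by_cases he : idx1 = idx2
        · -- midpoint i = X - i: both ranges empty
          rw [PySem.List.pyRange_one_eq_nil (by rw [hfd]; omega),
              PySem.List.pyRange_one_eq_nil (by rw [hfd]; omega)]
        · by_cases hge : c ≤ idx1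
          · -- idx1 ≥ c: both ranges empty
            rw [PySem.List.pyRange_one_eq_nil (by rw [hfd]; omega),
                PySem.List.pyRange_one_eq_nil (by rw [hfd]; omega)]
          · -- idx2 ≥ c: both lower bounds are idx1 + idx2 - c + 1
            have h2 : c ≤ idx2 := by
              by_contra h; exact hcond ⟨he, by omega, by omega⟩
            have : max (idx1 + 1) (idx1 + idx2 - c + 1) = max idx1 (idx1 + idx2 - c + 1) := by
              omega
            rw [this]
    · -- loop exits: the closed-form range is empty
      rw [dif_neg h1, PySem.List.pyRange_one_eq_nil (by rw [hfd]; omega)]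
      simp

-- ===== VERDICT (by name: the statement is the Claim_ definition above) =====
theorem factor_pairs_spec : Claim_equal_factor_pairs := by
  intro X c _
  unfold Spec_factor_pairs factor_pairs factor_pairs_alt
  rw [factorLoopA_eq c (X - 1 - 1 + 1).toNat 1 (X - 1) [] rfl]
  have hs : 1 + (X - 1) = X := by ring
  rw [hs]
  simp
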